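-- pv_equiv track=rewrite | github.com/lawmakeruk/keeling-schedule-research | app/services/xml_handler.py | get_ancestor_eids
-- ===== SOURCE A (Python) =====
-- from typing import Optional, List, Tuple, Dict, Any
--
-- def get_ancestor_eids(eid: str, include_self: bool = False) -> List[str]:
--     """
--     Get all ancestor eIds from a given eId.
--
--     Args:
--         eid: Element ID
--         include_self: Whether to include the original eId in the result
--
--     Returns:
--         List of ancestor eIds, ordered from root to immediate parent
--     """
--     parts = eid.split("__") if eid else []
--     ancestors = []
--
--     # Build ancestors from root down
--     for i in range(1, len(parts)):
--         ancestors.append("__".join(parts[:i]))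
--
--     if include_self and parts:
--         ancestors.append(eid)
--
--     return ancestors
-- ===== SOURCE B (Python) =====
-- def get_ancestor_eids(eid, include_self=False):
--     """Scan eid for "__" delimiters with find(), collecting each prefix directly."""
--     ancestors = []
--     start = 0
--     while True:
--         pos = eid.find("__", start)
--         if pos == -1:
--             break
--         ancestors.append(eid[:pos])
--         start = pos + 2
--     if include_self and eid:
--         ancestors.append(eid)
--     return ancestors
-- ===== Notes on version B (the rewrite author's own statement) =====
-- stated objective: alternative
-- what changed: B never builds the list of parts: it scans the string once with find('__', start) and emits each ancestor as a direct prefix slice eid[:pos], instead of A's split followed by re-joining a growing take of the parts for every i.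
import Mathlib
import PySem

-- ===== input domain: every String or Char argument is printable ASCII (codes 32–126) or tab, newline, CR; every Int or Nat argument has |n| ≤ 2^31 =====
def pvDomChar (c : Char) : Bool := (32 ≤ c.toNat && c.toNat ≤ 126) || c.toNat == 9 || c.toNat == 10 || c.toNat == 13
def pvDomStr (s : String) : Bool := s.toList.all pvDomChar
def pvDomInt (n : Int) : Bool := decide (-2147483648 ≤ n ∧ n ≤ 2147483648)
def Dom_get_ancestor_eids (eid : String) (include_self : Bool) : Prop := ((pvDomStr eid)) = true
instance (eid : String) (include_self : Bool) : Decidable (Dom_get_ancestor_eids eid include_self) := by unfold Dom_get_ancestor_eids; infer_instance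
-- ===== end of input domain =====

-- B replaces A's split-then-rejoin by a single find("__", start) scan that emits each ancestor as a direct prefix slice; alternative decomposition, same asymptotic cost.

-- ===== PORT A =====
-- A: parts = eid.split("__") if eid else []; for i in range(1, len(parts)): append "__".join(parts[:i]); optionally append eid.
-- Str.split? is `some` whenever the separator is nonempty ("__" here), so `.getD []` is exact.
def get_ancestor_eids (eid : String) (include_self : Bool) : List String :=
  let parts : List String := if !(eid == "") then (PySem.Str.split? eid "__").getD [] else []
  let ancestors := (PySem.List.pyRange 1 (parts.length : Int) 1).foldl
    (fun acc i => acc ++ [PySem.Str.join "__" (PySem.List.slice parts none (some i))]) []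
  if include_self && !parts.isEmpty then ancestors ++ [eid] else ancestors

-- ===== PORT B =====
-- the while loop of Source B: pos = eid.find("__", start); stop on -1, else emit eid[:pos] and continue at pos + 2.
-- fuel (eid.length + 1) only makes the recursion structural; start strictly grows each step, so it never runs out.
def pvScanB (eid : String) (start : Nat) : Nat → List String
  | 0 => []
  | fuel+1 =>
    let pos := PySem.Str.findFrom eid "__" (start : Nat) none
    if pos = -1 then []
    else String.ofList (PySem.List.slice eid.toList none (some pos)) :: pvScanB eid (pos.toNat + 2) fuel

def get_ancestor_eids_alt (eid : String) (include_self : Bool) : List String :=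
  let ancestors := pvScanB eid 0 (eid.toList.length + 1)
  if include_self && !(eid == "") then ancestors ++ [eid] else ancestors

-- ===== PRECONDITION & SPEC =====
def Spec_get_ancestor_eids (eid : String) (include_self : Bool) (out : List String) : Prop := out = get_ancestor_eids_alt eid include_self
instance (eid : String) (include_self : Bool) (out : List String) : Decidable (Spec_get_ancestor_eids eid include_self out) := by unfold Spec_get_ancestor_eids; infer_instance

-- ===== CLAIM (what is proved, stated in full; the proofs are below) =====
def Claim_equal_get_ancestor_eids : Prop := ∀ (eid : String) (include_self : Bool), Dom_get_ancestor_eids eid include_self → Spec_get_ancestor_eids eid include_self (get_ancestor_eids eid include_self)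

-- ===== LEMMAS AND PROOFS =====

theorem pv_findGo_shift (sub : List Char) (hsub : sub ≠ []) (t : List Char) (k : Nat) :
    PySem.Chars.find.go sub t k =
      if PySem.Chars.find t sub = -1 then -1 else PySem.Chars.find t sub + k := by
  induction t generalizing k with
  | nil => simp [PySem.Chars.find, PySem.Chars.find.go, hsub]
  | cons c rest ih =>
    simp only [PySem.Chars.find, PySem.Chars.find.go]
    by_cases hp : sub.isPrefixOf (c :: rest)
    · simp [hp]
    · simp only [hp, Bool.false_eq_true, if_false, ih]
      have := PySem.Chars.neg_one_le_find rest sub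
      split_ifs <;> push_cast <;> omega

theorem pv_find_cons (sub : List Char) (hsub : sub ≠ []) (c : Char) (rest : List Char) :
    PySem.Chars.find (c :: rest) sub =
      if sub.isPrefixOf (c :: rest) then 0
      else if PySem.Chars.find rest sub = -1 then -1 else PySem.Chars.find rest sub + 1 := by
  simp only [PySem.Chars.find, PySem.Chars.find.go]
  by_cases hp : sub.isPrefixOf (c :: rest)
  · simp [hp]
  · simp only [hp, if_false]
    rw [pv_findGo_shift sub hsub]
    simp [PySem.Chars.find]

theorem pv_find_nil (sub : List Char) (hsub : sub ≠ []) : PySem.Chars.find [] sub = -1 := by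
  simp [PySem.Chars.find, PySem.Chars.find.go, hsub]

def pvRefGo : List Char → List Char → List (List Char)
  | [], cur => [cur.reverse]
  | c :: rest, cur =>
    if ['_','_'].isPrefixOf (c :: rest) then cur.reverse :: pvRefGo ((c :: rest).drop 2) []
    else pvRefGo rest (c :: cur)
termination_by l _ => l.length
decreasing_by all_goals simp

theorem pv_splitOn_go (fuel : Nat) (l cur : List Char) (acc : List (List Char)) (h : l.length ≤ fuel) :
    PySem.Chars.splitOn.go ['_','_'] fuel l cur acc = acc.reverse ++ pvRefGo l cur := by
  induction fuel generalizing l cur acc with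
  | zero =>
    have : l = [] := by simpa using h
    subst this
    simp [PySem.Chars.splitOn.go, pvRefGo]
  | succ n ih =>
    cases l with
    | nil => simp [PySem.Chars.splitOn.go, pvRefGo]
    | cons c rest =>
      simp only [PySem.Chars.splitOn.go, pvRefGo]
      by_cases hp : ['_','_'].isPrefixOf (c :: rest)
      · have hd : ((c :: rest).drop 2).length ≤ n := by simp at h ⊢; omega
        simp only [hp, if_true, show (['_','_'] : List Char).length = 2 from rfl]
        rw [ih _ _ _ hd]
        simp
      · have hr : rest.length ≤ n := by simp at h; omega
        simp only [hp, Bool.false_eq_true, if_false]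
        rw [ih _ _ _ hr]

theorem pv_splitOn_eq (l : List Char) : PySem.Chars.splitOn l ['_','_'] = pvRefGo l [] := by
  have := pv_splitOn_go (l.length + 1) l [] [] (by omega)
  simpa [PySem.Chars.splitOn] using this

theorem pv_refGo_step (l : List Char) : ∀ cur,
    pvRefGo l cur =
      if PySem.Chars.find l ['_','_'] = -1 then [cur.reverse ++ l]
      else (cur.reverse ++ l.take (PySem.Chars.find l ['_','_']).toNat) ::
        pvRefGo (l.drop ((PySem.Chars.find l ['_','_']).toNat + 2)) [] := by
  induction l with
  | nil => intro cur; simp [pvRefGo, pv_find_nil]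
  | cons c rest ih =>
    intro cur
    rw [pv_find_cons ['_','_'] (by simp) c rest]
    by_cases hp : ['_','_'].isPrefixOf (c :: rest)
    · simp [pvRefGo, hp]
    · have hne : PySem.Chars.find (c :: rest) ['_','_'] ≠ 0 := by
        rw [pv_find_cons ['_','_'] (by simp) c rest]
        have := PySem.Chars.neg_one_le_find rest ['_','_']
        simp only [hp, Bool.false_eq_true, if_false]
        split <;> omega
      simp only [pvRefGo, hp, Bool.false_eq_true, if_false]
      rw [ih (c :: cur)]
      have hrest := PySem.Chars.neg_one_le_find rest ['_','_']
      by_cases hr : PySem.Chars.find rest ['_','_'] = -1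
      · simp [hr]
      · have h0 : 0 ≤ PySem.Chars.find rest ['_','_'] := by omega
        simp only [hr, Bool.false_eq_true, if_false]
        have hne1 : PySem.Chars.find rest ['_','_'] + 1 ≠ -1 := by omega
        simp only [hne1, if_false]
        have htn : (PySem.Chars.find rest ['_','_'] + 1).toNat
            = (PySem.Chars.find rest ['_','_']).toNat + 1 := by omega
        rw [htn]
        simp [List.take_succ_cons]

theorem pv_refGo_ne_nil (l cur : List Char) : pvRefGo l cur ≠ [] := by
  rw [pv_refGo_step]; split <;> simp

def pvPrefJoins (parts : List (List Char)) : List (List Char) :=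
  (List.range (parts.length - 1)).map (fun i => PySem.Chars.join ['_','_'] (parts.take (i+1)))

theorem pv_join_cons (t : List Char) (parts : List (List Char)) (h : parts ≠ []) :
    PySem.Chars.join ['_','_'] (t :: parts) = t ++ ['_','_'] ++ PySem.Chars.join ['_','_'] parts := by
  cases parts with
  | nil => simp at h
  | cons q r => exact PySem.Chars.join_cons_cons _ _ _ _

theorem pv_prefJoins_cons (t : List Char) (parts : List (List Char)) (h : parts ≠ []) :
    pvPrefJoins (t :: parts) = t :: (pvPrefJoins parts).map (fun u => t ++ ['_','_'] ++ u) := by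
  unfold pvPrefJoins
  have hlen : (t :: parts).length - 1 = (parts.length - 1) + 1 := by
    cases parts with
    | nil => simp at h
    | cons a b => simp
  rw [hlen, List.range_succ_eq_map]
  simp only [List.map_cons, List.map_map]
  congr 1
  · simp [PySem.Chars.join_singleton]
  · apply List.map_congr_left
    intro i hi
    simp only [Function.comp]
    have htake : (t :: parts).take (i + 1 + 1) = t :: parts.take (i+1) := by simp
    rw [htake, pv_join_cons]
    intro hc
    have : parts.take (i+1) = [] ↔ parts = [] ∨ i + 1 = 0 := by
      constructor
      · intro hx
        rcases List.take_eq_nil_iff.mp hx with h1 | h1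
        · right; exact h1
        · left; exact h1
      · intro hx; rcases hx with h1 | h1
        · simp [h1]
        · omega
    rcases this.mp hc with h1 | h1
    · exact h h1
    · omega

theorem pv_take_delim (s : List Char) (p : Nat)
    (hpre : ['_','_'] <+: s.drop p) :
    s.take (p + 2) = s.take p ++ ['_','_'] := by
  rw [List.take_add]
  congr 1
  rcases hpre with ⟨tail, htail⟩
  rw [← htail]
  rfl

def pvCharScan (s : List Char) (start : Nat) : Nat → List (List Char)
  | 0 => []
  | fuel+1 =>
    let pos := PySem.Chars.findFrom s ['_','_'] (start : Int) none
    if pos = -1 then []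
    else s.take pos.toNat :: pvCharScan s (pos.toNat + 2) fuel

theorem pv_scan_shift (fuel : Nat) : ∀ (s : List Char) (start : Nat), start ≤ s.length →
    pvCharScan s start fuel = (pvCharScan (s.drop start) 0 fuel).map (fun u => s.take start ++ u) := by
  induction fuel with
  | zero => intro s start h; simp [pvCharScan]
  | succ n ih =>
    intro s start h
    simp only [pvCharScan]
    rw [PySem.Chars.findFrom_natCast s ['_','_'] start h]
    simp only [Nat.cast_zero, PySem.Chars.findFrom_zero]
    set q := PySem.Chars.find (s.drop start) ['_','_'] with hq
    by_cases hneg : q = -1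
    · simp [hneg]
    · have hq0 : 0 ≤ q := by
        have := PySem.Chars.neg_one_le_find (s.drop start) ['_','_']
        rw [← hq] at this; omega
      have hsum : ¬ ((start : Int) + q = -1) := by omega
      simp only [hneg, hsum, Bool.false_eq_true, if_false, List.map_cons]
      have hql : q ≤ ((s.drop start).length : Int) := by
        have := PySem.Chars.find_le_length (s.drop start) ['_','_']
        rw [← hq] at this; exact this
      have hpre : ['_','_'] <+: (s.drop start).drop q.toNat :=
        (PySem.Chars.find_spec (s := s.drop start) (sub := ['_','_']) (by rw [← hq]; omega)).1
      have hqlen : q.toNat + 2 ≤ (s.drop start).length := by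
        have h2 := hpre.length_le
        simp only [List.length_drop, List.length_cons, List.length_nil] at h2 hql ⊢
        omega
      have htn : ((start : Int) + q).toNat = start + q.toNat := by omega
      congr 1
      · -- heads
        rw [htn, List.take_add]
      · -- tails
        rw [htn]
        rw [ih s (start + q.toNat + 2) (by simp at hqlen ⊢; omega)]
        rw [ih (s.drop start) (q.toNat + 2) (by omega)]
        simp only [List.map_map, List.drop_drop]
        have hdrop : s.drop (start + (q.toNat + 2)) = s.drop (q.toNat + 2 + start) := by ring_nf
        rw [show start + q.toNat + 2 = start + (q.toNat + 2) by ring, List.drop_drop] at *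
        apply List.map_congr_left
        intro u hu
        simp only [Function.comp]
        rw [show start + (q.toNat + 2) = start + (q.toNat + 2) from rfl]
        rw [List.take_add, List.append_assoc]

theorem pv_scan_main (fuel : Nat) : ∀ (s : List Char), s.length < fuel →
    pvCharScan s 0 fuel = pvPrefJoins (pvRefGo s []) := by
  induction fuel with
  | zero => intro s h; omega
  | succ n ih =>
    intro s h
    simp only [pvCharScan, Nat.cast_zero, PySem.Chars.findFrom_zero]
    set p := PySem.Chars.find s ['_','_'] with hpdef
    rw [pv_refGo_step s []]
    by_cases hneg : p = -1
    · simp [hneg, ← hpdef, pvPrefJoins]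
    · have hp0 : 0 ≤ p := by
        have := PySem.Chars.neg_one_le_find s ['_','_']
        rw [← hpdef] at this; omega
      have hpre : ['_','_'] <+: s.drop p.toNat :=
        (PySem.Chars.find_spec (s := s) (sub := ['_','_']) (by rw [← hpdef]; omega)).1
      have hplen : p.toNat + 2 ≤ s.length := by
        have h2 := hpre.length_le
        have h3 := PySem.Chars.find_le_length s ['_','_']
        rw [← hpdef] at h3
        simp only [List.length_drop, List.length_cons, List.length_nil] at h2
        omega
      simp only [← hpdef, hneg, Bool.false_eq_true, if_false]
      rw [pv_scan_shift n s (p.toNat + 2) hplen]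
      rw [ih (s.drop (p.toNat + 2)) (by simp only [List.length_drop]; omega)]
      rw [pv_prefJoins_cons _ _ (pv_refGo_ne_nil _ _)]
      simp only [List.nil_append, List.reverse_nil]
      congr 1
      apply List.map_congr_left
      intro u hu
      rw [pv_take_delim s p.toNat hpre]

theorem pv_sep_toList : ("__" : String).toList = ['_','_'] := rfl

theorem pv_scanB_eq (eid : String) (fuel : Nat) : ∀ (start : Nat), start ≤ eid.toList.length →
    pvScanB eid start fuel = (pvCharScan eid.toList start fuel).map String.ofList := by
  induction fuel with
  | zero => intro start h; simp [pvScanB, pvCharScan]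
  | succ n ih =>
    intro start h
    simp only [pvScanB, pvCharScan, PySem.Str.findFrom_eq, pv_sep_toList]
    rw [PySem.Chars.findFrom_natCast eid.toList ['_','_'] start h]
    set q := PySem.Chars.find (eid.toList.drop start) ['_','_'] with hq
    by_cases hneg : q = -1
    · simp [hneg]
    · have hq0 : 0 ≤ q := by
        have := PySem.Chars.neg_one_le_find (eid.toList.drop start) ['_','_']
        rw [← hq] at this; omega
      have hsum : ¬ ((start : Int) + q = -1) := by omega
      have hpre : ['_','_'] <+: (eid.toList.drop start).drop q.toNat :=
        (PySem.Chars.find_spec (s := eid.toList.drop start) (sub := ['_','_']) (by rw [← hq]; omega)).1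
      have hql := PySem.Chars.find_le_length (eid.toList.drop start) ['_','_']
      rw [← hq] at hql
      have hqlen : q.toNat + 2 ≤ (eid.toList.drop start).length := by
        have h2 := hpre.length_le
        simp only [List.length_drop, List.length_cons, List.length_nil] at h2 hql ⊢
        omega
      simp only [hneg, hsum, Bool.false_eq_true, if_false, List.map_cons]
      congr 1
      · rw [PySem.List.slice_to eid.toList (by omega)]
      · rw [ih ((↑start + q).toNat + 2) (by simp only [List.length_drop] at hqlen; omega)]

theorem pv_foldl_map {α β : Type} (l : List α) (f : α → β) (acc : List β) :
    l.foldl (fun a i => a ++ [f i]) acc = acc ++ l.map f := by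
  induction l generalizing acc with
  | nil => simp
  | cons x t ih => simp [ih]

theorem pv_pyRange_one (N : Nat) :
    PySem.List.pyRange 1 (N : Int) 1 = (List.range (N - 1)).map (fun (k : ℕ) => (1 : Int) + 1 * (k : Int)) := by
  simp only [PySem.List.pyRange]
  norm_num
  have h2 : (if 1 < N then N - 1 else 0) = N - 1 := by split <;> omega
  rw [h2]

theorem pv_split_eid (eid : String) :
    PySem.Str.split? eid "__" = some ((pvRefGo eid.toList []).map String.ofList) := by
  simp [PySem.Str.split?, PySem.Chars.split?, pv_sep_toList, pv_splitOn_eq]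

theorem pv_join_ofList (cl : List (List Char)) :
    PySem.Str.join "__" (cl.map String.ofList) = String.ofList (PySem.Chars.join ['_','_'] cl) := by
  conv_lhs => rw [← String.ofList_toList (s := PySem.Str.join "__" (cl.map String.ofList))]
  rw [PySem.Str.toList_join]
  simp [pv_sep_toList, List.map_map, Function.comp_def, String.toList_ofList]

theorem pv_main (eid : String) (inc : Bool) :
    get_ancestor_eids eid inc = get_ancestor_eids_alt eid inc := by
  by_cases he : eid = ""
  · subst he; cases inc <;> rfl
  · have hbeq : (eid == "") = false := by simp [he]
    have hLne : eid.toList ≠ [] := by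
      intro h
      exact he (by rw [← String.ofList_toList (s := eid), h])
    unfold get_ancestor_eids get_ancestor_eids_alt
    simp only [hbeq, Bool.not_false, if_true, pv_split_eid, Option.getD_some]
    set CL := pvRefGo eid.toList [] with hCL
    have hCLne : CL ≠ [] := pv_refGo_ne_nil _ _
    have hplen : (CL.map String.ofList).length = CL.length := by simp
    -- A's loop as a map
    rw [pv_foldl_map, List.nil_append, hplen, pv_pyRange_one, List.map_map]
    -- B's loop
    have hB := pv_scanB_eq eid (eid.toList.length + 1) 0 (Nat.zero_le _)
    have hM := pv_scan_main (eid.toList.length + 1) eid.toList (Nat.lt_succ_self _)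
    rw [hB, hM]
    -- the two element lists agree
    have hmaps :
        (List.range (CL.length - 1)).map
          ((fun i => PySem.Str.join "__" (PySem.List.slice (CL.map String.ofList) none (some i))) ∘
            fun (k : ℕ) => (1 : Int) + 1 * (k : Int))
        = (pvPrefJoins CL).map String.ofList := by
      unfold pvPrefJoins
      rw [List.map_map]
      apply List.map_congr_left
      intro k hk
      simp only [Function.comp]
      rw [PySem.List.slice_to _ (by omega : (0:Int) ≤ 1 + 1 * k)]
      have htn : ((1 : Int) + 1 * k).toNat = k + 1 := by omega
      rw [htn, ← List.map_take, pv_join_ofList]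
    rw [hmaps]
    have hne2 : (CL.map String.ofList).isEmpty = false := by
      simp [List.isEmpty_iff, hCLne]
    rw [hne2]
    norm_num
    rw [← hCL]

-- ===== VERDICT (by name: the statement is the Claim_ definition above) =====
theorem get_ancestor_eids_spec : Claim_equal_get_ancestor_eids := by
  intro eid include_self _
  unfold Spec_get_ancestor_eids
  exact pv_main eid include_self
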